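-- pv_equiv track=rewrite | github.com/EnigmaCurry/matrix-bot | matrix_reminder_bot/emoji_grid.py | top_mirror
-- ===== SOURCE A (Python) =====
-- import math
--
-- def top_mirror(in_grid):
--     grid = in_grid.copy()
--     middle = math.ceil(len(grid) / 2) - 1
--     for r in range(len(grid)):
--         b = len(grid) - r
--         if r > middle:
--             grid[r] = grid[b-1]
--     return grid
-- ===== SOURCE B (Python) =====
-- def top_mirror(in_grid):
--     n = len(in_grid)
--     mid = (n + 1) // 2
--     return in_grid[:mid] + in_grid[:n - mid][::-1]
-- ===== Notes on version B (the rewrite author's own statement) =====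
-- stated objective: simpler
-- what changed: Replaces A's index loop over the whole copied grid (with a midpoint guard and in-place overwrites) by slicing: return the top half concatenated with the reversed prefix of length n - ceil(n/2).
import Mathlib
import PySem

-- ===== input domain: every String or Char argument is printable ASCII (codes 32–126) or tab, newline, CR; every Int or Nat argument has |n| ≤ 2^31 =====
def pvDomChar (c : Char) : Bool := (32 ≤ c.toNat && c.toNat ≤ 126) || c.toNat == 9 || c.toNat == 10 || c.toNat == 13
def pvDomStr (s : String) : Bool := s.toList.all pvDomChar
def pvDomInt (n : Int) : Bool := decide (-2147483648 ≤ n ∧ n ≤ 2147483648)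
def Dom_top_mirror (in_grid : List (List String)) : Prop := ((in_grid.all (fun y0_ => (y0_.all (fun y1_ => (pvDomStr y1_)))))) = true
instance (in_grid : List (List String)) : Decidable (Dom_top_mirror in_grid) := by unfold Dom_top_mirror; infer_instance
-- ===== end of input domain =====

-- B mirrors the top half onto the bottom by slicing and concatenation instead of
-- A's index loop overwriting a copy in place; same return value, simpler decomposition.
-- (A does not mutate its argument; neither does B.)

-- ===== PORT A =====
-- grid[r] = grid[b-1]: the read index b-1 = len-r-1 is always in range (0 ≤ r < len),
-- so pyGetD with default [] is exact; pySetD is the total in-range assignment.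
def top_mirror (in_grid : List (List String)) : List (List String) :=
  let grid := in_grid
  let middle := PySem.Int.floordiv ((grid.length : Int) + 1) 2 - 1  -- math.ceil(len/2) - 1
  (PySem.List.pyRange 0 (grid.length : Int) 1).foldl
    (fun g r =>
      let b := (g.length : Int) - r
      if r > middle then PySem.List.pySetD g r (PySem.List.pyGetD g (b - 1) []) else g)
    grid

-- ===== PORT B =====
def top_mirror_alt (in_grid : List (List String)) : List (List String) :=
  let n := in_grid.length
  let mid := (n + 1) / 2
  in_grid.take mid ++ (in_grid.take (n - mid)).reverse

-- ===== PRECONDITION & SPEC =====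
def Spec_top_mirror (in_grid : List (List String)) (out : List (List String)) : Prop := out = top_mirror_alt in_grid
instance (in_grid : List (List String)) (out : List (List String)) : Decidable (Spec_top_mirror in_grid out) := by unfold Spec_top_mirror; infer_instance

-- ===== CLAIM (what is proved, stated in full; the proofs are below) =====
def Claim_equal_top_mirror : Prop := ∀ (in_grid : List (List String)), Dom_top_mirror in_grid → Spec_top_mirror in_grid (top_mirror in_grid)

-- ===== LEMMAS AND PROOFS =====

-- The loop body of A's port, with n the (constant) grid length.
def pvStepA (middle : Int) (g : List (List String)) (r : Int) : List (List String) :=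
  let b := (g.length : Int) - r
  if r > middle then PySem.List.pySetD g r (PySem.List.pyGetD g (b - 1) []) else g

-- Loop invariant: after folding range(0,k), the length is unchanged and entry i is
-- xs[n-1-i] for mid ≤ i < k and xs[i] otherwise.
lemma pvFold_inv (xs : List (List String)) (k : Nat) (hk : k ≤ xs.length) :
    ((PySem.List.pyRange 0 (k : Int) 1).foldl (pvStepA ((((xs.length : Int) + 1) / 2) - 1)) xs).length = xs.length ∧
    ∀ i, i < xs.length →
      ((PySem.List.pyRange 0 (k : Int) 1).foldl (pvStepA ((((xs.length : Int) + 1) / 2) - 1)) xs)[i]?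
        = if (xs.length + 1) / 2 ≤ i ∧ i < k then xs[xs.length - 1 - i]? else xs[i]? := by
  induction k with
  | zero =>
    refine ⟨by simp [PySem.List.pyRange_one_eq_nil (by omega : (0:Int) ≤ 0)], ?_⟩
    intro i hi
    simp [PySem.List.pyRange_one_eq_nil (by omega : (0:Int) ≤ 0)]
  | succ k ih =>
    have hk' : k ≤ xs.length := by omega
    obtain ⟨hlen, hpt⟩ := ih hk'
    have hsplit : PySem.List.pyRange 0 ((k : Int) + 1) 1
        = PySem.List.pyRange 0 (k : Int) 1 ++ [(k : Int)] :=
      PySem.List.pyRange_one_succ_right (by positivity)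
    set n := xs.length with hn
    set mid := (n + 1) / 2 with hmid
    set g := (PySem.List.pyRange 0 (k : Int) 1).foldl (pvStepA (((n : Int) + 1) / 2 - 1)) xs with hg
    have hcast : ((k : Int) + 1) = ((k + 1 : Nat) : Int) := by push_cast; ring
    have hcast2 : ((n : Int) + 1) / 2 = (mid : Int) := by omega
    rw [← hcast, hsplit, List.foldl_append, List.foldl_cons, List.foldl_nil, ← hg]
    by_cases hmidk : mid ≤ k
    · -- r > middle: overwrite g[k] with g[n-1-k]
      have hgt : (k : Int) > ((n : Int) + 1) / 2 - 1 := by omega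
      have hidx : ((g.length : Int) - (k : Int)) - 1 = ((n - 1 - k : Nat) : Int) := by
        rw [hlen]; omega
      have hsrc_lt : n - 1 - k < n := by omega
      have hsrc_val : g[n - 1 - k]? = xs[n - 1 - k]? := by
        rw [hpt _ hsrc_lt]
        have hnot : ¬ (mid ≤ n - 1 - k ∧ n - 1 - k < k) := by omega
        simp [hnot]
      have hstep : pvStepA (((n : Int) + 1) / 2 - 1) g (k : Int)
          = g.set k (g.getD (n - 1 - k) []) := by
        simp only [pvStepA, if_pos hgt, hidx, PySem.List.pyGetD_natCast,
          PySem.List.pySetD_natCast]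
      rw [hstep]
      have hgetD : g.getD (n - 1 - k) [] = xs.getD (n - 1 - k) [] := by
        rw [List.getD_eq_getElem?_getD, List.getD_eq_getElem?_getD, hsrc_val]
      refine ⟨by simp [hlen], ?_⟩
      intro i hi
      rw [hgetD, List.getElem?_set]
      by_cases hik : k = i
      · subst hik
        have hkl : k < g.length := by omega
        simp only [hkl, if_true]
        have hcond : mid ≤ k ∧ k < k + 1 := by omega
        rw [if_pos hcond, List.getD_eq_getElem?_getD,
          List.getElem?_eq_getElem (by omega : n - 1 - k < xs.length)]
        simp
      · simp only [hik, if_false]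
        rw [hpt _ hi]
        have hiff : (mid ≤ i ∧ i < k) ↔ (mid ≤ i ∧ i < k + 1) := by omega
        simp [hiff]
    · -- r ≤ middle: no change
      have hle : ¬ ((k : Int) > ((n : Int) + 1) / 2 - 1) := by omega
      have hstep : pvStepA (((n : Int) + 1) / 2 - 1) g (k : Int) = g := by
        simp only [pvStepA, if_neg hle]
      rw [hstep]
      refine ⟨hlen, ?_⟩
      intro i hi
      rw [hpt _ hi]
      have hiff : (mid ≤ i ∧ i < k) ↔ (mid ≤ i ∧ i < k + 1) := by omega
      simp [hiff]

-- ===== VERDICT (by name: the statement is the Claim_ definition above) =====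
theorem top_mirror_spec : Claim_equal_top_mirror := by
  intro xs _
  show top_mirror xs = top_mirror_alt xs
  have hA : top_mirror xs
      = (PySem.List.pyRange 0 (xs.length : Int) 1).foldl
          (pvStepA ((((xs.length : Int) + 1) / 2) - 1)) xs := by
    simp only [top_mirror,
      PySem.Int.floordiv_eq_ediv_of_pos (show (0:Int) < 2 by omega)]
    rfl
  obtain ⟨hlen, hpt⟩ := pvFold_inv xs xs.length le_rfl
  set n := xs.length with hn
  set mid := (n + 1) / 2 with hmid
  have hB : top_mirror_alt xs = xs.take mid ++ (xs.take (n - mid)).reverse := rfl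
  rw [hA, hB]
  have hmidle : mid ≤ n := by omega
  apply List.ext_getElem?
  intro i
  by_cases hi : i < n
  · rw [hpt i hi]
    by_cases him : mid ≤ i
    · have hcond : mid ≤ i ∧ i < n := ⟨him, hi⟩
      rw [if_pos hcond]
      rw [List.getElem?_append_right (by simp; omega)]
      rw [List.getElem?_reverse (by simp; omega)]
      simp only [List.length_take, List.getElem?_take]
      have h2 : min (n - mid) xs.length - 1 - (i - min mid xs.length) = n - 1 - i := by
        omega
      rw [h2, if_pos (by omega : n - 1 - i < n - mid)]
    · have hcond : ¬ (mid ≤ i ∧ i < n) := by omega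
      rw [if_neg hcond]
      rw [List.getElem?_append_left (by simp; omega)]
      rw [List.getElem?_take_of_lt (by omega : i < mid)]
  · have hB : (xs.take mid ++ (xs.take (n - mid)).reverse).length = n := by
      simp; omega
    rw [List.getElem?_eq_none (by rw [hlen]; omega),
      List.getElem?_eq_none (by rw [hB]; omega)]
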